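-- pv_equiv track=rewrite | github.com/dideek/Wordle-Solver | utils.py | check_exact_position
-- ===== SOURCE A (Python) =====
-- WORD_LENGTH = 5
--
-- def check_exact_position(answer_word, input_word):
--     colors = 0;
--
--     # Bitmapa dla zielonych kolorów
--     for i in range(WORD_LENGTH):
--         if answer_word[i] == input_word[i]:
--             colors += 3
--         colors *= 4
--     colors//=4
--
--     return colors
-- ===== SOURCE B (Python) =====
-- WORD_LENGTH = 5
--
-- def check_exact_position(answer_word, input_word):
--     digits = ''
--     for i in range(WORD_LENGTH):
--         digits += '3' if answer_word[i] == input_word[i] else '0'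
--     return int(digits, 4)
-- ===== Notes on version B (the rewrite author's own statement) =====
-- stated objective: simpler
-- what changed: B builds an explicit 5-digit base-4 string ('3' for a positional match, '0' otherwise) and parses it with int(digits, 4), replacing A's Horner multiply-accumulate with a trailing divide-by-4 correction.
import Mathlib
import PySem

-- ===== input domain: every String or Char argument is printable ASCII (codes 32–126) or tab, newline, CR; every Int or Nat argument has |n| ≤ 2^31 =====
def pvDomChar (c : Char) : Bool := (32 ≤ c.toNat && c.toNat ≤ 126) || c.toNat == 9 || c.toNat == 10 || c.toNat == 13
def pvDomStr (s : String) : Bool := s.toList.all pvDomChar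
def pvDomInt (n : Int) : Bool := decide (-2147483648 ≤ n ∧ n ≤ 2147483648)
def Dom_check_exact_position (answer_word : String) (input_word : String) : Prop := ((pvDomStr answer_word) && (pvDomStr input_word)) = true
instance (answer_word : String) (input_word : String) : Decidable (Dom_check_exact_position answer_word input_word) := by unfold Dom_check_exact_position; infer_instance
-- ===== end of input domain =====

-- B replaces A's Horner multiply-accumulate (with trailing //4) by an explicit
-- base-4 digit string parsed with int(digits, 4); objective: simpler decomposition.

-- ===== PORT A =====
-- colors accumulator; an out-of-range index (word shorter than 5) is an IndexError,
-- modelled by the Option state (none); excluded by Pre_.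
def check_exact_position (answer_word : String) (input_word : String) : Int :=
  let st := (PySem.List.pyRange 0 5 1).foldl
    (fun (acc : Option Int) (i : Int) =>
      acc.bind fun colors =>
        match PySem.Str.pyGet? answer_word i, PySem.Str.pyGet? input_word i with
        | some x, some y => some ((if x == y then colors + 3 else colors) * 4)
        | _, _ => none)
    (some 0)
  match st with
  | some colors => PySem.Int.floordiv colors 4
  | none => 0   -- unreachable under Pre_ (Python raises IndexError here)

-- ===== PORT B =====
-- digits built left to right, then int(digits, 4) = PySem.Int.ofCharsBase?;
-- the parse always succeeds on a '0'/'3' digit string ⇒ getD 0 is unreachable.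
def check_exact_position_alt (answer_word : String) (input_word : String) : Int :=
  let digits := (PySem.List.pyRange 0 5 1).foldl
    (fun (s : Option (List Char)) (i : Int) =>
      s.bind fun ds =>
        (PySem.Str.pyGet? answer_word i).bind fun x =>   -- none = IndexError, excluded by Pre_
          (PySem.Str.pyGet? input_word i).bind fun y =>
            some (ds ++ [if x == y then '3' else '0']))
    (some [])
  (digits.bind fun ds => PySem.Int.ofCharsBase? ds 4).getD 0   -- getD unreachable under Pre_

-- ===== PRECONDITION & SPEC =====
-- A (and B) raise IndexError when either word has fewer than 5 characters.
def Pre_check_exact_position (answer_word : String) (input_word : String) : Prop :=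
  5 ≤ answer_word.toList.length ∧ 5 ≤ input_word.toList.length
instance (answer_word : String) (input_word : String) : Decidable (Pre_check_exact_position answer_word input_word) := by unfold Pre_check_exact_position; infer_instance

def pvWitness_check_exact_position : String × String := ("abcde", "abxde")

def Spec_check_exact_position (answer_word : String) (input_word : String) (out : Int) : Prop := out = check_exact_position_alt answer_word input_word
instance (answer_word : String) (input_word : String) (out : Int) : Decidable (Spec_check_exact_position answer_word input_word out) := by unfold Spec_check_exact_position; infer_instance

-- ===== CLAIM (what is proved, stated in full; the proofs are below) =====
def Claim_equal_check_exact_position : Prop := ∀ (answer_word : String) (input_word : String), Dom_check_exact_position answer_word input_word → Pre_check_exact_position answer_word input_word → Spec_check_exact_position answer_word input_word (check_exact_position answer_word input_word)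

-- ===== LEMMAS AND PROOFS =====

theorem pv_get5 (s : String) (a0 a1 a2 a3 a4 : Char) (r : List Char)
    (h : s.toList = a0 :: a1 :: a2 :: a3 :: a4 :: r) :
    PySem.Str.pyGet? s 0 = some a0 ∧ PySem.Str.pyGet? s 1 = some a1 ∧
    PySem.Str.pyGet? s 2 = some a2 ∧ PySem.Str.pyGet? s 3 = some a3 ∧
    PySem.Str.pyGet? s 4 = some a4 := by
  refine ⟨?_, ?_, ?_, ?_, ?_⟩ <;>
    (simp [PySem.Str.pyGet?, h, PySem.List.pyGet?, PySem.List.pyIdx?];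
     try rw [if_pos (by omega)];
     try simp)

-- ===== VERDICT (by name: the statement is the Claim_ definition above) =====
theorem check_exact_position_spec : Claim_equal_check_exact_position := by
  intro a b _ hPre
  obtain ⟨ha, hb⟩ := hPre
  rcases hla : a.toList with _ | ⟨a0, _ | ⟨a1, _ | ⟨a2, _ | ⟨a3, _ | ⟨a4, ar⟩⟩⟩⟩⟩ <;>
    (simp [hla] at ha; try omega)
  rcases hlb : b.toList with _ | ⟨b0, _ | ⟨b1, _ | ⟨b2, _ | ⟨b3, _ | ⟨b4, br⟩⟩⟩⟩⟩ <;>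
    (simp [hlb] at hb; try omega)
  obtain ⟨h0a, h1a, h2a, h3a, h4a⟩ := pv_get5 a a0 a1 a2 a3 a4 ar hla
  obtain ⟨h0b, h1b, h2b, h3b, h4b⟩ := pv_get5 b b0 b1 b2 b3 b4 br hlb
  unfold Spec_check_exact_position check_exact_position check_exact_position_alt
  rw [show PySem.List.pyRange 0 5 1 = [0, 1, 2, 3, 4] from rfl]
  simp only [List.foldl, h0a, h1a, h2a, h3a, h4a, h0b, h1b, h2b, h3b, h4b, Option.bind_some]
  split_ifs <;> decide
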